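-- pv_equiv track=rewrite | github.com/Makanov-Nurzhan/python_sheet | data structure/arrays.py | minRewards
-- ===== SOURCE A (Python) =====
-- def minRewards(scores):
--     res = [1 for _ in scores]
--     for i in range(1, len(scores)):
--         j = i - 1
--         if scores[i] > scores[j]:
--             res[i] = res[j] + 1
--         else:
--             while j >= 0 and scores[j] > scores[j + 1]:
--                 res[j] = max(res[j], res[j + 1] + 1)
--                 j -= 1
--     return sum(res)
-- ===== SOURCE B (Python) =====
-- def minRewards(scores):
--     # Two linear passes: up-run lengths left-to-right, down-run lengths via
--     # up-runs of the reversed list; answer is the sum of pointwise maxima.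
--     def ups(xs):
--         out = []
--         prev = None
--         run = 0
--         for x in xs:
--             run = run + 1 if out and x > prev else 1
--             out.append(run)
--             prev = x
--         return out
--     u = ups(scores)
--     d = ups(scores[::-1])[::-1]
--     return sum(max(a, b) for a, b in zip(u, d))
-- ===== Notes on version B (the rewrite author's own statement) =====
-- stated objective: faster
-- what changed: Replaced A's forward scan with a quadratic backward-fixing inner while loop by two linear passes: up-run lengths left-to-right and down-run lengths (up-runs of the reversed list), summing pointwise maxima.
import Mathlib
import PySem

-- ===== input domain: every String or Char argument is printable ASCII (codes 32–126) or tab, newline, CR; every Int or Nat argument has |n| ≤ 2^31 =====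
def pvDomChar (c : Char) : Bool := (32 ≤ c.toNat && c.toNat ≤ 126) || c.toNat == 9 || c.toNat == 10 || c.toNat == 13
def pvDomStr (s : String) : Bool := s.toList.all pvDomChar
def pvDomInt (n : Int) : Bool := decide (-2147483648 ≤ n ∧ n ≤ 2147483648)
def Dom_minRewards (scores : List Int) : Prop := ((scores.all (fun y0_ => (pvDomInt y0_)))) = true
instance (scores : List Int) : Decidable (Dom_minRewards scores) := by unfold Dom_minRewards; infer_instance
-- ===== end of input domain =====

-- B replaces A's O(n^2) backward-fixing inner while loop by two linear passes
-- (up-run lengths, and down-run lengths as up-runs of the reversed list), summing pointwise maxima.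

-- ===== PORT A =====
-- the inner `while j >= 0 and scores[j] > scores[j+1]` loop; the Nat argument is j+1 (0 = loop exit at j = -1)
def pvFixA (scores : List Int) (res : List Int) : Nat → List Int
  | 0 => res
  | j + 1 =>
    if scores.getD j 0 > scores.getD (j + 1) 0 then
      pvFixA scores (res.set j (max (res.getD j 0) (res.getD (j + 1) 0 + 1))) j
    else res

-- one iteration of the `for i in range(1, len(scores))` loop body
def pvStepA (scores : List Int) (res : List Int) (i : Nat) : List Int :=
  if scores.getD i 0 > scores.getD (i - 1) 0 then
    res.set i (res.getD (i - 1) 0 + 1)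
  else pvFixA scores res i

def minRewards (scores : List Int) : Int :=
  let res0 := scores.map (fun _ => (1 : Int))
  let res := (List.range' 1 (scores.length - 1)).foldl (pvStepA scores) res0
  res.sum

-- ===== PORT B =====
-- `ups` of Source B: the running length of the strictly increasing run ending at each position
def upsGo (prev run : Int) : List Int → List Int
  | [] => []
  | x :: xs =>
    let r := if x > prev then run + 1 else 1
    r :: upsGo x r xs

def ups : List Int → List Int
  | [] => []
  | x :: xs => 1 :: upsGo x 1 xs

def minRewards_alt (scores : List Int) : Int :=
  let u := ups scores
  let d := (ups scores.reverse).reverse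
  (List.zipWith (fun a b => max a b) u d).sum

-- ===== PRECONDITION & SPEC =====
def Spec_minRewards (scores : List Int) (out : Int) : Prop := out = minRewards_alt scores
instance (scores : List Int) (out : Int) : Decidable (Spec_minRewards scores out) := by unfold Spec_minRewards; infer_instance

-- ===== CLAIM (what is proved, stated in full; the proofs are below) =====
def Claim_equal_minRewards : Prop := ∀ (scores : List Int), Dom_minRewards scores → Spec_minRewards scores (minRewards scores)

-- ===== LEMMAS AND PROOFS =====

-- length of the strictly decreasing run starting at p, looking at most f steps ahead
def dnAux (s : List Int) : Nat → Nat → Int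
  | _, 0 => 1
  | p, f + 1 => if s.getD p 0 > s.getD (p + 1) 0 then dnAux s (p + 1) f + 1 else 1

lemma dnAux_pos (s : List Int) : ∀ f p, 1 ≤ dnAux s p f := by
  intro f
  induction f with
  | zero => intro p; simp [dnAux]
  | succ f ih =>
    intro p
    simp only [dnAux]
    split
    · have := ih (p + 1); omega
    · omega

lemma dnAux_mono (s : List Int) : ∀ f f' p, f ≤ f' → dnAux s p f ≤ dnAux s p f' := by
  intro f
  induction f with
  | zero => intro f' p _; exact dnAux_pos s f' p
  | succ f ih =>
    intro f' p h
    obtain ⟨f'', rfl⟩ : ∃ f'', f' = f'' + 1 := ⟨f' - 1, by omega⟩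
    simp only [dnAux]
    split
    · have := ih f'' (p + 1) (by omega); omega
    · omega

-- if the run is broken at j (s[j] ≤ s[j+1]) then any fuel ≥ j - p gives the same value
lemma dnAux_stable (s : List Int) (j : Nat) (hj : ¬ s.getD j 0 > s.getD (j + 1) 0) :
    ∀ m f p, j - p = m → p ≤ j → m ≤ f → dnAux s p f = dnAux s p m := by
  intro m
  induction m with
  | zero =>
    intro f p hm hp _
    have hpj : p = j := by omega
    subst hpj
    cases f with
    | zero => rfl
    | succ f =>
      show dnAux s p (f + 1) = dnAux s p 0
      simp only [dnAux]
      rw [if_neg hj]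
  | succ m ih =>
    intro f p hm hp hf
    obtain ⟨f', rfl⟩ : ∃ f', f = f' + 1 := ⟨f - 1, by omega⟩
    simp only [dnAux]
    split
    · have := ih f' (p + 1) (by omega) (by omega) (by omega); omega
    · rfl

lemma upsGo_length (prev run : Int) : ∀ xs : List Int, (upsGo prev run xs).length = xs.length := by
  intro xs
  induction xs generalizing prev run with
  | nil => rfl
  | cons x xs ih => simp [upsGo, ih]

lemma ups_length (s : List Int) : (ups s).length = s.length := by
  cases s with
  | nil => rfl
  | cons x xs => simp [ups, upsGo_length]

lemma ups_getD_zero (s : List Int) (h : 0 < s.length) : (ups s).getD 0 0 = 1 := by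
  cases s with
  | nil => simp at h
  | cons x xs => simp [ups]

lemma upsGo_getD_succ (prev run : Int) :
    ∀ (xs : List Int) (p : Nat), p + 1 < xs.length →
    (upsGo prev run xs).getD (p + 1) 0 =
      if xs.getD (p + 1) 0 > xs.getD p 0 then (upsGo prev run xs).getD p 0 + 1 else 1 := by
  intro xs
  induction xs generalizing prev run with
  | nil => intro p h; simp at h
  | cons x xs ih =>
    intro p h
    cases p with
    | zero =>
      cases xs with
      | nil => simp at h
      | cons y ys => simp [upsGo]
    | succ p =>
      have h' : p + 1 < xs.length := by simpa using h
      have := ih x (if x > prev then run + 1 else 1) p h'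
      simpa [upsGo] using this

lemma ups_getD_succ (s : List Int) (p : Nat) (h : p + 1 < s.length) :
    (ups s).getD (p + 1) 0 =
      if s.getD (p + 1) 0 > s.getD p 0 then (ups s).getD p 0 + 1 else 1 := by
  cases s with
  | nil => simp at h
  | cons x xs =>
    cases p with
    | zero =>
      cases xs with
      | nil => simp at h
      | cons y ys => simp [ups, upsGo]
    | succ p =>
      have h' : p + 1 + 1 ≤ xs.length := by simpa using h
      have := upsGo_getD_succ x 1 xs p (by omega)
      simpa [ups] using this

lemma ups_pos (s : List Int) : ∀ p, p < s.length → 1 ≤ (ups s).getD p 0 := by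
  intro p
  induction p with
  | zero => intro h; rw [ups_getD_zero s h]
  | succ p ih =>
    intro h
    rw [ups_getD_succ s p h]
    split
    · have := ih (by omega); omega
    · omega

-- getD / set helpers
lemma getD_set_self (l : List Int) (j : Nat) (v : Int) (h : j < l.length) :
    (l.set j v).getD j 0 = v := by
  simp [List.getD_eq_getElem?_getD, h]

lemma getD_set_ne (l : List Int) (j p : Nat) (v : Int) (h : p ≠ j) :
    (l.set j v).getD p 0 = l.getD p 0 := by
  simp [List.getD_eq_getElem?_getD, Ne.symm h]

-- the loop invariant for A: after processing indices 1..k,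
-- res[p] = max(up-run ending at p, down-run starting at p inside [0..k]) for p ≤ k, else 1
def InvA (s : List Int) (k : Nat) (res : List Int) : Prop :=
  res.length = s.length ∧
  ∀ p, p < s.length →
    res.getD p 0 = if p ≤ k then max ((ups s).getD p 0) (dnAux s p (k - p)) else 1

lemma fixA (s : List Int) (i : Nat) (h2 : i < s.length) :
    ∀ (m : Nat) (res : List Int), m ≤ i → res.length = s.length →
    (∀ p, p < s.length → res.getD p 0 =
        if p < m then max ((ups s).getD p 0) (dnAux s p (i - 1 - p))
        else if p ≤ i then max ((ups s).getD p 0) (dnAux s p (i - p)) else 1) →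
    (pvFixA s res m).length = s.length ∧
    ∀ p, p < s.length → (pvFixA s res m).getD p 0 =
        if p ≤ i then max ((ups s).getD p 0) (dnAux s p (i - p)) else 1 := by
  intro m
  induction m with
  | zero =>
    intro res _ hlen hres
    refine ⟨by simpa [pvFixA] using hlen, ?_⟩
    intro p hp
    have := hres p hp
    simpa [pvFixA] using this
  | succ m ih =>
    intro res hm hlen hres
    by_cases hc : s.getD m 0 > s.getD (m + 1) 0
    · -- loop body runs: res[m] := max(res[m], res[m+1]+1), continue with m
      simp only [pvFixA, if_pos hc]
      refine ih _ (by omega) (by simpa using hlen) ?_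
      intro p hp
      by_cases hpm : p = m
      · subst hpm
        rw [getD_set_self res p _ (by omega)]
        have hv1 := hres p hp
        have hv2 := hres (p + 1) (by omega)
        rw [if_pos (by omega)] at hv1
        rw [if_neg (by omega), if_pos (by omega)] at hv2
        -- ups at p+1 is 1 since s[p] > s[p+1]
        have hup1 : (ups s).getD (p + 1) 0 = 1 := by
          rw [ups_getD_succ s p (by omega)]
          rw [if_neg (by omega)]
        have hdpos := dnAux_pos s (i - (p + 1)) (p + 1)
        have hdn : dnAux s p (i - p) = dnAux s (p + 1) (i - (p + 1)) + 1 := by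
          obtain ⟨f, hf⟩ : ∃ f, i - p = f + 1 := ⟨i - p - 1, by omega⟩
          have hf2 : f = i - (p + 1) := by omega
          rw [hf, hf2]
          simp only [dnAux]
          rw [if_pos hc]
        rw [hv1, hv2, if_neg (by omega), if_pos (by omega), hup1]
        rw [max_eq_right (dnAux_pos s (i - (p + 1)) (p + 1)), hdn, max_assoc]
        congr 1
        apply max_eq_right
        have hmono := dnAux_mono s (i - 1 - p) (i - p) p (by omega)
        rw [hdn] at hmono
        omega
      · rw [getD_set_ne res m p _ hpm]
        have := hres p hp
        rcases Nat.lt_or_ge p m with h | h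
        · rw [if_pos (by omega)] at this ⊢
          exact this
        · rw [if_neg (by omega)] at this
          rw [if_neg (by omega)]
          exact this
    · -- loop exits at j = m; below m the down-runs of prefix i-1 and i agree
      simp only [pvFixA, if_neg hc]
      refine ⟨hlen, ?_⟩
      intro p hp
      have := hres p hp
      rcases Nat.lt_or_ge p (m + 1) with h | h
      · rw [if_pos (by omega)] at this
        rw [if_pos (by omega)]
        have e1 := dnAux_stable s m hc (m - p) (i - 1 - p) p rfl (by omega) (by omega)
        have e2 := dnAux_stable s m hc (m - p) (i - p) p rfl (by omega) (by omega)
        rw [this, e1, ← e2]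
      · rw [if_neg (by omega)] at this
        exact this

lemma stepA (s : List Int) (res : List Int) (i : Nat) (h1 : 1 ≤ i) (h2 : i < s.length)
    (hInv : InvA s (i - 1) res) : InvA s i (pvStepA s res i) := by
  obtain ⟨hlen, hres⟩ := hInv
  by_cases hc : s.getD i 0 > s.getD (i - 1) 0
  · -- increasing step: res[i] := res[i-1] + 1
    simp only [pvStepA, if_pos hc]
    refine ⟨by simpa using hlen, ?_⟩
    intro p hp
    have hups : 1 ≤ (ups s).getD (i - 1) 0 := ups_pos s (i - 1) (by omega)
    by_cases hpi : p = i
    · subst hpi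
      rw [getD_set_self res p _ (by omega)]
      have hv := hres (p - 1) (by omega)
      rw [if_pos (by omega)] at hv
      have hfz : (p - 1) - (p - 1) = 0 := by omega
      rw [hfz] at hv
      have hv1 : res.getD (p - 1) 0 = (ups s).getD (p - 1) 0 := by
        rw [hv]
        simp only [dnAux]
        exact max_eq_left (ups_pos s (p - 1) (by omega))
      have hup : (ups s).getD p 0 = (ups s).getD (p - 1) 0 + 1 := by
        obtain ⟨q, hq⟩ : ∃ q, p = q + 1 := ⟨p - 1, by omega⟩
        subst hq
        rw [ups_getD_succ s q (by omega)]
        simp only [Nat.add_sub_cancel] at hc ⊢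
        rw [if_pos hc]
      rw [if_pos (by omega)]
      have hfz2 : p - p = 0 := by omega
      rw [hfz2]
      have hm : max ((ups s).getD p 0) (dnAux s p 0) = (ups s).getD p 0 := by
        simp only [dnAux]
        exact max_eq_left (ups_pos s p (by omega))
      rw [hm, hv1, hup]
    · rw [getD_set_ne res i p _ hpi]
      have := hres p hp
      rcases Nat.lt_or_ge p i with h | h
      · rw [if_pos (by omega)] at this
        rw [if_pos (by omega)]
        -- the run is broken at i-1 since s[i-1] < s[i]
        have hnb : ¬ s.getD (i - 1) 0 > s.getD (i - 1 + 1) 0 := by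
          have : i - 1 + 1 = i := by omega
          rw [this]; omega
        have e1 := dnAux_stable s (i - 1) hnb ((i - 1) - p) (i - 1 - p) p rfl (by omega) (by omega)
        have e2 := dnAux_stable s (i - 1) hnb ((i - 1) - p) (i - p) p rfl (by omega) (by omega)
        rw [this, e1, ← e2]
      · rw [if_neg (by omega)] at this
        rw [if_neg (by omega)]
        exact this
  · -- non-increasing step: run the backward while loop starting at j = i - 1
    simp only [pvStepA, if_neg hc]
    have hfix := fixA s i h2 i res (le_refl i) hlen ?_
    · exact ⟨hfix.1, hfix.2⟩
    · intro p hp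
      have := hres p hp
      rcases Nat.lt_or_ge p i with h | h
      · rw [if_pos (by omega)] at this
        rw [if_pos (by omega)]
        exact this
      · rcases Nat.eq_or_lt_of_le h with h' | h'
        · -- p = i : currently 1; target max(ups i, 1) with ups i = 1
          rw [if_neg (by omega)] at this
          rw [if_neg (by omega), if_pos (by omega)]
          have hup : (ups s).getD p 0 = 1 := by
            obtain ⟨q, hq⟩ : ∃ q, p = q + 1 := ⟨p - 1, by omega⟩
            subst hq
            rw [ups_getD_succ s q (by omega)]
            have hc' : ¬ s.getD (q + 1) 0 > s.getD q 0 := by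
              have e : i = q + 1 := by omega
              rw [e] at hc
              simpa using hc
            rw [if_neg hc']
          have hfz : i - p = 0 := by omega
          rw [this, hup, hfz]
          simp [dnAux]
        · rw [if_neg (by omega)] at this
          rw [if_neg (by omega), if_neg (by omega)]
          exact this

lemma ones_getD (s : List Int) (p : Nat) (hp : p < s.length) :
    (s.map (fun _ => (1 : Int))).getD p 0 = 1 := by
  rw [List.getD_eq_getElem _ _ (by simpa using hp)]
  simp

lemma foldA (s : List Int) : ∀ k, k ≤ s.length - 1 →
    InvA s k ((List.range' 1 k).foldl (pvStepA s) (s.map fun _ => (1 : Int))) := by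
  intro k
  induction k with
  | zero =>
    intro _
    refine ⟨by simp, ?_⟩
    intro p hp
    simp only [List.range'_zero, List.foldl_nil]
    rw [ones_getD s p hp]
    by_cases h : p = 0
    · subst h
      rw [if_pos (le_refl 0)]
      rw [ups_getD_zero s hp]
      simp [dnAux]
    · rw [if_neg (by omega)]
  | succ k ih =>
    intro hk
    have hk' : k ≤ s.length - 1 := by omega
    have hrange : List.range' 1 (k + 1) = List.range' 1 k ++ [1 + 1 * k] := List.range'_concat
    rw [hrange, List.foldl_append]
    simp only [List.foldl_cons, List.foldl_nil]
    have h1k : 1 + 1 * k = k + 1 := by omega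
    rw [h1k]
    exact stepA s _ (k + 1) (by omega) (by omega) (by simpa using ih hk')

lemma rev_getD (s : List Int) (q : Nat) (hq : q < s.length) :
    s.reverse.getD q 0 = s.getD (s.length - 1 - q) 0 := by
  have h1 : q < s.reverse.length := by simpa using hq
  rw [List.getD_eq_getElem _ _ h1, List.getD_eq_getElem _ _ (by omega)]
  rw [List.getElem_reverse]

-- the reversed up-runs list, read at p, is the down-run length starting at p
lemma dlist_rec (s : List Int) (p : Nat) (hp : p < s.length) :
    ((ups s.reverse).reverse).getD p 0 =
      if p + 1 < s.length ∧ s.getD p 0 > s.getD (p + 1) 0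
      then ((ups s.reverse).reverse).getD (p + 1) 0 + 1 else 1 := by
  have hlen : (ups s.reverse).length = s.length := by simp [ups_length]
  have hgd : ∀ q, q < s.length →
      ((ups s.reverse).reverse).getD q 0 = (ups s.reverse).getD (s.length - 1 - q) 0 := by
    intro q hq
    have h1 : q < (ups s.reverse).reverse.length := by simpa [hlen] using hq
    rw [List.getD_eq_getElem _ _ h1, List.getD_eq_getElem _ _ (by simp [hlen]; omega)]
    rw [List.getElem_reverse]
    congr 1
    simp [hlen]
  rcases Nat.lt_or_ge (p + 1) s.length with h | h
  · rw [hgd p hp, hgd (p + 1) h]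
    obtain ⟨q, hq⟩ : ∃ q, s.length - 1 - p = q + 1 := ⟨s.length - 2 - p, by omega⟩
    rw [hq]
    rw [ups_getD_succ (s.reverse) q (by simp; omega)]
    rw [rev_getD s (q + 1) (by omega), rev_getD s q (by omega)]
    have e1 : s.length - 1 - (q + 1) = p := by omega
    have e2 : s.length - 1 - q = p + 1 := by omega
    have e3 : s.length - 1 - (p + 1) = q := by omega
    rw [e1, e2, e3]
    split
    · rw [if_pos (by omega)]
    · rw [if_neg (by omega)]
  · rw [hgd p hp]
    have e : s.length - 1 - p = 0 := by omega
    rw [e, ups_getD_zero s.reverse (by simp; omega)]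
    rw [if_neg (by omega)]

lemma dlist_eq_dnAux (s : List Int) :
    ∀ f p, p < s.length → s.length - 1 - p = f →
    ((ups s.reverse).reverse).getD p 0 = dnAux s p f := by
  intro f
  induction f with
  | zero =>
    intro p hp hf
    rw [dlist_rec s p hp, if_neg (by omega)]
    simp [dnAux]
  | succ f ih =>
    intro p hp hf
    rw [dlist_rec s p hp]
    simp only [dnAux]
    split
    · rename_i hcond
      rw [ih (p + 1) (by omega) (by omega), if_pos hcond.2]
    · rename_i hcond
      have hnc : ¬ s.getD p 0 > s.getD (p + 1) 0 := fun h => hcond ⟨by omega, h⟩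
      rw [if_neg hnc]

-- ===== VERDICT (by name: the statement is the Claim_ definition above) =====
theorem minRewards_spec : Claim_equal_minRewards := by
  intro s _
  unfold Spec_minRewards minRewards minRewards_alt
  show ((List.range' 1 (s.length - 1)).foldl (pvStepA s) (s.map fun _ => (1 : Int))).sum
      = (List.zipWith (fun a b => max a b) (ups s) ((ups s.reverse).reverse)).sum
  have hInv := foldA s (s.length - 1) (le_refl _)
  obtain ⟨hlen, hres⟩ := hInv
  set res := (List.range' 1 (s.length - 1)).foldl (pvStepA s) (s.map fun _ => (1 : Int)) with hresdef
  have hulen : (ups s).length = s.length := ups_length s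
  have hdlen : ((ups s.reverse).reverse).length = s.length := by simp [ups_length]
  have hzlen : (List.zipWith (fun a b => max a b) (ups s) ((ups s.reverse).reverse)).length
      = s.length := by simp [hulen, hdlen]
  have : res = List.zipWith (fun a b => max a b) (ups s) ((ups s.reverse).reverse) := by
    apply List.ext_getElem (by rw [hlen, hzlen])
    intro p h1 h2
    have hp : p < s.length := by omega
    have hv := hres p hp
    rw [if_pos (by omega)] at hv
    rw [← List.getD_eq_getElem res 0 h1, hv]
    rw [List.getElem_zipWith]
    rw [← List.getD_eq_getElem (ups s) 0 (by omega), ← List.getD_eq_getElem _ 0 (by omega)]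
    rw [dlist_eq_dnAux s (s.length - 1 - p) p hp rfl]
  rw [this]
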